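-- pv_equiv track=rewrite | github.com/BastienMonet/TestSAE | histoire2foot.py | nb_matchs_sans_defaites
-- ===== SOURCE A (Python) =====
-- def equipe_gagnante_liste(liste_matchs):
--     """retourne les noms des équipes qui ont gagné un match. Si c'est un match nul on retourne 0
--
--     Args:
--         liste_match (tuple): une liste de matchs
--
--     Returns:
--         list: le nom des équipes gagnantes
--     """
--     res=[]
--     for i in range(len(liste_matchs)):
--         if liste_matchs[i][3]>liste_matchs[i][4]:
--             res.append(liste_matchs[i][1])
--         elif liste_matchs[i][3]<liste_matchs[i][4]:
--             res.append(liste_matchs[i][2])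
--         else:
--             res.append(0)
--     return res
--
-- def nb_matchs_sans_defaites(liste_matchs, equipe):
--     """retourne le plus grand nombre de matchs consécutifs sans défaite pour une equipe donnée.
--
--     Args:
--         liste_matchs (list): une liste de matchs
--         equipe (str): le nom d'une équipe (pays)
--
--     Returns:
--         int: le plus grand nombre de matchs consécutifs sans défaite du pays nom_pays
--     """
--     max=0
--     cpt=0
--     for i in range(len(equipe_gagnante_liste(liste_matchs))):
--         if equipe_gagnante_liste(liste_matchs)[i] == equipe:
--             cpt+=1
--         if cpt > max:
--             max=cpt
--         else:
--             cpt=0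
--     return max
-- ===== SOURCE B (Python) =====
-- def nb_matchs_sans_defaites(liste_matchs, equipe):
--     """Longest run of consecutive wins of `equipe`: winners computed once, one linear pass."""
--     best = 0
--     cur = 0
--     for (_, dom, ext, sd, se) in liste_matchs:
--         gagnant = dom if sd > se else (ext if sd < se else None)
--         if gagnant == equipe:
--             cur += 1
--             if cur > best:
--                 best = cur
--         else:
--             cur = 0
--     return best
-- ===== Notes on version B (the rewrite author's own statement) =====
-- stated objective: faster
-- what changed: B determines each match's winner once during a single linear pass with a current/best run counter, instead of rebuilding the whole winners list on every loop iteration and using A's counter that can only grow along the first winning streak.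
-- intended difference: On inputs whose match list contains, after equipe's first winning streak, a strictly longer window of consecutive wins of equipe, A returns only the first streak's length (its 'else: cpt=0' resets the counter whenever it does not exceed the recorded max, so no later streak can ever be recorded), while B returns the longest streak's length, which is what the docstring ('le plus grand nombre de matchs consecutifs sans defaite') specifies. — e.g. on nb_matchs_sans_defaites([("d", "A", "B", 1, 0), ("d", "B", "A", 1, 0), ("d", "A", "B", 1, 0), ("d", "A", "B", 1, 0)], "A"): A returns 1, B returns 2
import Mathlib
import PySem

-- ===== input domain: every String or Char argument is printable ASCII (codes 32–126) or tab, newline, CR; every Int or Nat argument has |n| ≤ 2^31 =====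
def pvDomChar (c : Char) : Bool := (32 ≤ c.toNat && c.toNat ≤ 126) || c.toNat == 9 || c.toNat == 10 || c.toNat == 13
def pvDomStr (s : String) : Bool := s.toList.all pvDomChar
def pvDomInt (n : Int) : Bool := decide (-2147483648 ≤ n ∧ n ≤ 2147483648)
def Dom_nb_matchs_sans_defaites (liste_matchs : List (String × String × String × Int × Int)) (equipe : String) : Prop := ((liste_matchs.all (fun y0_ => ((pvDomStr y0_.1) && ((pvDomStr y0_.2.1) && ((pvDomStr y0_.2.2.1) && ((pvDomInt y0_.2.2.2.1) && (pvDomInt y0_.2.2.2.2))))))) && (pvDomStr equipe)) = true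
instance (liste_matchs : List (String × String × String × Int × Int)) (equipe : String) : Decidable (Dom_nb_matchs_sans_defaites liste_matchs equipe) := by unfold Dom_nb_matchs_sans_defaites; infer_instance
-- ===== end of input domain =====

-- B replaces A's quadratic loop (which rebuilds the winners list at every iteration and whose
-- counter can only grow along the first winning streak) by a single linear pass with a
-- current/best run counter, returning the true longest streak of wins (objective: faster).

-- ===== PORT A =====
-- A's winner list: a Python element is a team name (str) or the int 0 on a draw; ported as
-- Option String with none for 0 (0 == equipe is always False in Python, as is none == some e here).
-- liste_matchs[i] with i drawn from range(len(...)) is always in range, so pyGetD is exact.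
def equipe_gagnante_liste (liste_matchs : List (String × String × String × Int × Int)) : List (Option String) :=
  (PySem.List.pyRange 0 (liste_matchs.length : Int) 1).foldl
    (fun res i =>
      let m := PySem.List.pyGetD liste_matchs i ("", "", "", 0, 0)
      if m.2.2.2.1 > m.2.2.2.2 then res ++ [some m.2.1]
      else if m.2.2.2.1 < m.2.2.2.2 then res ++ [some m.2.2.1]
      else res ++ [none]) []

def nb_matchs_sans_defaites (liste_matchs : List (String × String × String × Int × Int)) (equipe : String) : Int :=
  -- A recomputes equipe_gagnante_liste(liste_matchs) on every iteration; so does this port.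
  ((PySem.List.pyRange 0 ((equipe_gagnante_liste liste_matchs).length : Int) 1).foldl
    (fun (s : Int × Int) i =>
      let cpt := if PySem.List.pyGetD (equipe_gagnante_liste liste_matchs) i none == some equipe
                 then s.2 + 1 else s.2
      if cpt > s.1 then (cpt, cpt) else (s.1, 0)) ((0 : Int), (0 : Int))).1

-- ===== PORT B =====
def pvGagnant (m : String × String × String × Int × Int) : Option String :=
  if m.2.2.2.1 > m.2.2.2.2 then some m.2.1
  else if m.2.2.2.1 < m.2.2.2.2 then some m.2.2.1
  else none

def nb_matchs_sans_defaites_alt (liste_matchs : List (String × String × String × Int × Int)) (equipe : String) : Int :=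
  (liste_matchs.foldl
    (fun (s : Int × Int) m =>
      if pvGagnant m == some equipe then
        let cur := s.2 + 1
        (if cur > s.1 then cur else s.1, cur)
      else (s.1, 0)) ((0 : Int), (0 : Int))).1

-- ===== PRECONDITION & SPEC =====
-- On inputs whose match list contains somewhere a block of consecutive wins of equipe strictly
-- longer than equipe's first winning streak, A returns only the first streak's length (its
-- 'else: cpt=0' resets the counter whenever it does not exceed the recorded max), while B
-- returns the longest streak's length, which is what the docstring specifies.
def D_nb_matchs_sans_defaites (liste_matchs : List (String × String × String × Int × Int)) (equipe : String) : Prop :=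
  let ws := (equipe_gagnante_liste liste_matchs).map (· == some equipe)
  List.replicate (((ws.dropWhile Bool.not).takeWhile id).length + 1) true <:+: ws
instance (liste_matchs : List (String × String × String × Int × Int)) (equipe : String) : Decidable (D_nb_matchs_sans_defaites liste_matchs equipe) := by unfold D_nb_matchs_sans_defaites; infer_instance

def Spec_nb_matchs_sans_defaites (liste_matchs : List (String × String × String × Int × Int)) (equipe : String) (out : Int) : Prop := ¬ D_nb_matchs_sans_defaites liste_matchs equipe → out = nb_matchs_sans_defaites_alt liste_matchs equipe
instance (liste_matchs : List (String × String × String × Int × Int)) (equipe : String) (out : Int) : Decidable (Spec_nb_matchs_sans_defaites liste_matchs equipe out) := by unfold Spec_nb_matchs_sans_defaites; infer_instance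

def pvDiffWitness_nb_matchs_sans_defaites : (List (String × String × String × Int × Int)) × String :=
  ([("d", "A", "B", 1, 0), ("d", "B", "A", 1, 0), ("d", "A", "B", 1, 0), ("d", "A", "B", 1, 0)], "A")
def pvDiffWitnessOut_nb_matchs_sans_defaites : Int × Int := (1, 2)

-- ===== CLAIM (what is proved, stated in full; the proofs are below) =====
def Claim_unchanged_nb_matchs_sans_defaites : Prop := ∀ (liste_matchs : List (String × String × String × Int × Int)) (equipe : String), Dom_nb_matchs_sans_defaites liste_matchs equipe → Spec_nb_matchs_sans_defaites liste_matchs equipe (nb_matchs_sans_defaites liste_matchs equipe)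
def Claim_changed_nb_matchs_sans_defaites : Prop := Dom_nb_matchs_sans_defaites (pvDiffWitness_nb_matchs_sans_defaites.1) (pvDiffWitness_nb_matchs_sans_defaites.2) ∧ D_nb_matchs_sans_defaites (pvDiffWitness_nb_matchs_sans_defaites.1) (pvDiffWitness_nb_matchs_sans_defaites.2) ∧ nb_matchs_sans_defaites (pvDiffWitness_nb_matchs_sans_defaites.1) (pvDiffWitness_nb_matchs_sans_defaites.2) = pvDiffWitnessOut_nb_matchs_sans_defaites.1 ∧ nb_matchs_sans_defaites_alt (pvDiffWitness_nb_matchs_sans_defaites.1) (pvDiffWitness_nb_matchs_sans_defaites.2) = pvDiffWitnessOut_nb_matchs_sans_defaites.2 ∧ pvDiffWitnessOut_nb_matchs_sans_defaites.1 ≠ pvDiffWitnessOut_nb_matchs_sans_defaites.2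
def Claim_exact_nb_matchs_sans_defaites : Prop := ∀ (liste_matchs : List (String × String × String × Int × Int)) (equipe : String), Dom_nb_matchs_sans_defaites liste_matchs equipe → D_nb_matchs_sans_defaites liste_matchs equipe → nb_matchs_sans_defaites liste_matchs equipe ≠ nb_matchs_sans_defaites_alt liste_matchs equipe

-- ===== LEMMAS AND PROOFS =====

-- proof-only spec functions: win boolean, leading run, first run, longest run
def pvWin (e : String) : String × String × String × Int × Int → Bool
  | (_, d, x, a, b) => (decide (a > b) && d == e) || (decide (a < b) && x == e)

def pvLead (ws : List Bool) : Nat := (ws.takeWhile id).length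

def pvFirstRun (ws : List Bool) : Nat := pvLead (ws.dropWhile Bool.not)

def pvMaxRun : List Bool → Nat
  | [] => 0
  | b :: t => Nat.max (pvLead (b :: t)) (pvMaxRun t)

-- loop bodies of the two ports, as functions of the per-match win boolean
def pvStepA (s : Int × Int) (b : Bool) : Int × Int :=
  let c := if b then s.2 + 1 else s.2
  if c > s.1 then (c, c) else (s.1, 0)

def pvStepB (s : Int × Int) (b : Bool) : Int × Int :=
  if b then
    let cur := s.2 + 1
    (if cur > s.1 then cur else s.1, cur)
  else (s.1, 0)

theorem pvGagnant_beq (equipe : String) (m : String × String × String × Int × Int) :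
    (pvGagnant m == some equipe) = pvWin equipe m := by
  obtain ⟨a, dom, ext, sd, se⟩ := m
  unfold pvGagnant pvWin
  split_ifs with h1 h2 <;> simp_all
  omega

theorem egl_eq_map (l : List (String × String × String × Int × Int)) :
    equipe_gagnante_liste l = l.map pvGagnant := by
  unfold equipe_gagnante_liste
  refine Eq.trans (PySem.List.foldl_pyRange_zero_pyGetD' l ("", "", "", 0, 0)
    (fun res m =>
      if m.2.2.2.1 > m.2.2.2.2 then res ++ [some m.2.1]
      else if m.2.2.2.1 < m.2.2.2.2 then res ++ [some m.2.2.1]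
      else res ++ [none]) []) ?_
  suffices h : ∀ (l : List (String × String × String × Int × Int)) (r : List (Option String)),
      l.foldl (fun res m =>
        if m.2.2.2.1 > m.2.2.2.2 then res ++ [some m.2.1]
        else if m.2.2.2.1 < m.2.2.2.2 then res ++ [some m.2.2.1]
        else res ++ [none]) r = r ++ l.map pvGagnant by
    simpa using h l []
  intro l
  induction l with
  | nil => simp
  | cons m t ih =>
      intro r
      simp only [List.foldl_cons, List.map_cons, ih]
      unfold pvGagnant
      split_ifs <;> simp

-- a window of L consecutive trues at the head is exactly L ≤ pvLead
theorem take_replicate_iff_lead (ws : List Bool) (L : Nat) :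
    ws.take L = List.replicate L true ↔ L ≤ pvLead ws := by
  induction ws generalizing L with
  | nil =>
      cases L <;> simp [pvLead, List.replicate]
  | cons b t ih =>
      cases L with
      | zero => simp [pvLead]
      | succ n =>
          cases b with
          | true =>
              simp [pvLead, List.takeWhile, List.replicate, ih n]
          | false =>
              simp [pvLead, List.takeWhile, List.replicate]

-- an infix block of L consecutive wins is exactly L ≤ pvMaxRun
theorem replicate_infix_iff_maxRun (ws : List Bool) (L : Nat) :
    (List.replicate L true <:+: ws) ↔ L ≤ pvMaxRun ws ∨ L = 0 := by
  induction ws with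
  | nil =>
      simp only [List.infix_nil, List.replicate_eq_nil_iff, pvMaxRun]
      omega
  | cons b t ih =>
      rw [List.infix_cons_iff, ih, List.prefix_iff_eq_take, List.length_replicate,
        eq_comm, take_replicate_iff_lead]
      have h1 : pvMaxRun (b :: t) = Nat.max (pvLead (b :: t)) (pvMaxRun t) := rfl
      simp only [h1, Nat.max_def]
      split_ifs <;> omega

theorem D_iff (l : List (String × String × String × Int × Int)) (equipe : String) :
    D_nb_matchs_sans_defaites l equipe
      ↔ pvFirstRun (l.map (pvWin equipe)) < pvMaxRun (l.map (pvWin equipe)) := by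
  have hmap : (equipe_gagnante_liste l).map (· == some equipe) = l.map (pvWin equipe) := by
    rw [egl_eq_map, List.map_map]
    exact List.map_congr_left fun m _ => pvGagnant_beq equipe m
  unfold D_nb_matchs_sans_defaites
  rw [hmap, replicate_infix_iff_maxRun]
  have : ((((l.map (pvWin equipe)).dropWhile Bool.not).takeWhile id).length)
        = pvFirstRun (l.map (pvWin equipe)) := rfl
  rw [this]
  omega

theorem A_char (l : List (String × String × String × Int × Int)) (equipe : String) :
    nb_matchs_sans_defaites l equipe = ((l.map (pvWin equipe)).foldl pvStepA ((0 : Int), 0)).1 := by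
  unfold nb_matchs_sans_defaites
  refine Eq.trans (congrArg Prod.fst
    (PySem.List.foldl_pyRange_zero_pyGetD' (equipe_gagnante_liste l) none
      (fun (s : Int × Int) x =>
        let cpt := if x == some equipe then s.2 + 1 else s.2
        if cpt > s.1 then (cpt, cpt) else (s.1, 0)) ((0 : Int), (0 : Int)))) ?_
  rw [egl_eq_map, List.foldl_map]
  have hfun : (fun (s : Int × Int) m =>
      (fun (s : Int × Int) x =>
        let cpt := if x == some equipe then s.2 + 1 else s.2
        if cpt > s.1 then (cpt, cpt) else (s.1, 0)) s (pvGagnant m))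
      = fun (s : Int × Int) m => pvStepA s (pvWin equipe m) := by
    funext s m
    simp only [pvStepA, pvGagnant_beq]
  rw [hfun, ← List.foldl_map]

theorem B_char (l : List (String × String × String × Int × Int)) (equipe : String) :
    nb_matchs_sans_defaites_alt l equipe = ((l.map (pvWin equipe)).foldl pvStepB ((0 : Int), 0)).1 := by
  unfold nb_matchs_sans_defaites_alt
  have hfun : (fun (s : Int × Int) m =>
      if pvGagnant m == some equipe then
        let cur := s.2 + 1
        (if cur > s.1 then cur else s.1, cur)
      else (s.1, 0))
      = fun (s : Int × Int) m => pvStepB s (pvWin equipe m) := by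
    funext s m
    simp only [pvStepB, pvGagnant_beq]
  rw [hfun, ← List.foldl_map]

theorem pvLead_le_maxRun (ws : List Bool) : pvLead ws ≤ pvMaxRun ws := by
  cases ws with
  | nil => exact Nat.le_refl _
  | cons b t => exact Nat.le_max_left _ _

theorem pvMaxRun_le_cons (b : Bool) (t : List Bool) : pvMaxRun t ≤ pvMaxRun (b :: t) :=
  Nat.le_max_right _ _

theorem pvFirstRun_le_maxRun (ws : List Bool) : pvFirstRun ws ≤ pvMaxRun ws := by
  induction ws with
  | nil => rfl
  | cons b t ih =>
      cases b with
      | true =>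
          have : pvFirstRun (true :: t) = pvLead (true :: t) := by
            simp [pvFirstRun, List.dropWhile]
          rw [this]; exact pvLead_le_maxRun _
      | false =>
          have : pvFirstRun (false :: t) = pvFirstRun t := by
            simp [pvFirstRun, List.dropWhile]
          rw [this]; exact le_trans ih (pvMaxRun_le_cons _ _)

theorem stepA_stuck (ws : List Bool) (m : Int) (hm : 0 < m) :
    ws.foldl pvStepA (m, 0) = (m, 0) := by
  induction ws with
  | nil => rfl
  | cons b t ih =>
      have hstep : pvStepA (m, 0) b = (m, 0) := by
        unfold pvStepA; cases b <;> simp <;> omega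
      simp only [List.foldl_cons, hstep, ih]

theorem stepA_run (ws : List Bool) : ∀ (m : Int), 0 < m →
    (ws.foldl pvStepA (m, m)).1 = m + (pvLead ws : Int) := by
  induction ws with
  | nil => intro m _; simp [pvLead]
  | cons b t ih =>
      intro m hm
      cases b with
      | true =>
          have hstep : pvStepA (m, m) true = (m + 1, m + 1) := by
            unfold pvStepA; simp
          rw [List.foldl_cons, hstep, ih (m + 1) (by omega)]
          have : pvLead (true :: t) = pvLead t + 1 := by
            simp [pvLead, List.takeWhile]
          rw [this]; push_cast; ring
      | false =>
          have hstep : pvStepA (m, m) false = (m, 0) := by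
            unfold pvStepA; simp
          rw [List.foldl_cons, hstep, stepA_stuck t m hm]
          have : pvLead (false :: t) = 0 := by simp [pvLead, List.takeWhile]
          rw [this]; simp

theorem stepA_first (ws : List Bool) :
    (ws.foldl pvStepA ((0 : Int), 0)).1 = (pvFirstRun ws : Int) := by
  induction ws with
  | nil => simp [pvFirstRun, pvLead]
  | cons b t ih =>
      cases b with
      | true =>
          have hstep : pvStepA ((0 : Int), 0) true = (1, 1) := by
            unfold pvStepA; simp
          rw [List.foldl_cons, hstep, stepA_run t 1 (by omega)]
          have : pvFirstRun (true :: t) = pvLead t + 1 := by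
            simp [pvFirstRun, pvLead, List.dropWhile]
          rw [this]; push_cast; ring
      | false =>
          have hstep : pvStepA ((0 : Int), 0) false = (0, 0) := by
            unfold pvStepA; simp
          rw [List.foldl_cons, hstep, ih]
          have : pvFirstRun (false :: t) = pvFirstRun t := by
            simp [pvFirstRun, List.dropWhile]
          rw [this]

theorem stepB_inv (ws : List Bool) : ∀ (best cur : Int), 0 ≤ cur → cur ≤ best →
    (ws.foldl pvStepB (best, cur)).1
      = max best (max (cur + (pvLead ws : Int)) (pvMaxRun ws : Int)) := by
  induction ws with
  | nil =>
      intro best cur h0 h1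
      simp [pvLead, pvMaxRun]; omega
  | cons b t ih =>
      intro best cur h0 h1
      cases b with
      | true =>
          have hstep : pvStepB (best, cur) true
              = (if cur + 1 > best then cur + 1 else best, cur + 1) := by
            unfold pvStepB; simp
          rw [List.foldl_cons, hstep,
            ih _ (cur + 1) (by omega) (by split_ifs <;> omega)]
          have h2 : pvLead (true :: t) = pvLead t + 1 := by
            simp [pvLead, List.takeWhile]
          have h3 : pvMaxRun (true :: t) = Nat.max (pvLead t + 1) (pvMaxRun t) := by
            rw [pvMaxRun, h2]
          rw [h2, h3]
          push_cast
          split_ifs <;> omega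
      | false =>
          have hstep : pvStepB (best, cur) false = (best, 0) := by
            unfold pvStepB; simp
          rw [List.foldl_cons, hstep, ih best 0 (by omega) (by omega)]
          have h2 : pvLead (false :: t) = 0 := by simp [pvLead, List.takeWhile]
          have h3 : pvMaxRun (false :: t) = pvMaxRun t := by
            rw [pvMaxRun, h2]; simp
          have h4 := pvLead_le_maxRun t
          rw [h2, h3]
          omega

theorem stepB_max (ws : List Bool) :
    (ws.foldl pvStepB ((0 : Int), 0)).1 = (pvMaxRun ws : Int) := by
  rw [stepB_inv ws 0 0 (by omega) (by omega)]
  have := pvLead_le_maxRun ws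
  omega

-- ===== VERDICT (by name: the statement is the Claim_ definition above) =====
theorem nb_matchs_sans_defaites_spec : Claim_unchanged_nb_matchs_sans_defaites := by
  intro l equipe _ hD
  rw [D_iff] at hD
  rw [A_char, B_char, stepA_first, stepB_max]
  have := pvFirstRun_le_maxRun (l.map (pvWin equipe))
  omega

theorem nb_matchs_sans_defaites_changed : Claim_changed_nb_matchs_sans_defaites := by
  unfold Claim_changed_nb_matchs_sans_defaites; decide

theorem nb_matchs_sans_defaites_tight : Claim_exact_nb_matchs_sans_defaites := by
  intro l equipe _ hD
  rw [D_iff] at hD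
  rw [A_char, B_char, stepA_first, stepB_max]
  omega
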